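-- pv_equiv track=rewrite | github.com/MaxLikhachev/StringAlgorythms | simple_algorythms/examples/second_lection.py | suffix_border_array
-- ===== SOURCE A (Python) =====
-- def suffix_border_array(s):
--     n = len(s)
--     bs = [0 for i in range(n)]
--     for i in range(n - 2, -1, -1):
--         bs_left = bs[i + 1]
--         while bs_left and s[i] != s[n - bs_left - 1]:
--             bs_left = bs[n - bs_left]
--         if s[i] == s[n - bs_left - 1]:
--             bs[i] = bs_left + 1
--         else:
--             bs[i] = 0
--     return bs
-- ===== SOURCE B (Python) =====
-- def suffix_border_array(s):
--     # Maintains the full (decreasing) list of all borders of the current suffix,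
--     # instead of KMP-style fallback jumps through the bs array.
--     n = len(s)
--     bs = [0] * n
--     borders = [0]  # all proper border lengths of s[i+1:], decreasing, ending in 0
--     for i in range(n - 2, -1, -1):
--         borders = [b + 1 for b in borders if s[i] == s[n - b - 1]] + [0]
--         bs[i] = borders[0]
--     return bs
-- ===== Notes on version B (the rewrite author's own statement) =====
-- stated objective: alternative
-- what changed: Instead of KMP-style fallback jumps through the bs array inside a while loop, B maintains the explicit decreasing list of all borders of the current suffix and extends it by one filter-map pass per position, reading bs[i] off its head.
import Mathlib
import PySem

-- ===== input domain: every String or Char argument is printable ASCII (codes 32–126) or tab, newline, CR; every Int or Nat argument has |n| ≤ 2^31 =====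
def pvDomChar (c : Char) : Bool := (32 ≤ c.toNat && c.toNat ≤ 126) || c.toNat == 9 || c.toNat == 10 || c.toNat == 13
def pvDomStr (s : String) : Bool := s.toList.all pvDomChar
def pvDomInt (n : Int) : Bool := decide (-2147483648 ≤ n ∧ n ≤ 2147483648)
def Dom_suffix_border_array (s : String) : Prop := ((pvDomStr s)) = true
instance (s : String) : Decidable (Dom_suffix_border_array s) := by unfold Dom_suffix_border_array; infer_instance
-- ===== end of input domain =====

-- B replaces A's KMP-style fallback walk through the bs array by maintaining the explicit
-- decreasing list of ALL borders of the current suffix (objective: alternative; return values identical).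

-- ===== PORT A =====
-- the 'while bs_left and s[i] != s[n - bs_left - 1]' loop; fuel n+1 always suffices because the
-- fallback chain strictly descends through positions of bs.  All indices Python uses are in range
-- on every execution, so pyGetD's default is never read.
def sbaFall (l : List Char) (i : Int) (bs : List Int) : Nat → Int → Int
  | 0, c => c
  | fuel + 1, c =>
    if c ≠ 0 ∧ PySem.List.pyGetD l i ' ' ≠ PySem.List.pyGetD l ((l.length : Int) - c - 1) ' ' then
      sbaFall l i bs fuel (PySem.List.pyGetD bs ((l.length : Int) - c) 0)
    else c

-- body of 'for i in range(n - 2, -1, -1)'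
def sbaStepA (l : List Char) (bs : List Int) (i : Int) : List Int :=
  let c := sbaFall l i bs (l.length + 1) (PySem.List.pyGetD bs (i + 1) 0)
  if PySem.List.pyGetD l i ' ' = PySem.List.pyGetD l ((l.length : Int) - c - 1) ' ' then
    PySem.List.pySetD bs i (c + 1)
  else
    PySem.List.pySetD bs i 0

def suffix_border_array (s : String) : List Int :=
  (PySem.List.pyRange ((s.toList.length : Int) - 2) (-1) (-1)).foldl
    (sbaStepA s.toList) (List.replicate s.toList.length 0)

-- ===== PORT B =====
-- body of B's loop: borders = [b + 1 for b in borders if s[i] == s[n - b - 1]] + [0]; bs[i] = borders[0]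
-- (borders is literally nonempty, so Python's borders[0] is ported as headD 0)
def sbaStepB (l : List Char) (st : List Int × List Int) (i : Int) : List Int × List Int :=
  let borders :=
    ((st.2.filter (fun b => decide (PySem.List.pyGetD l i ' ' = PySem.List.pyGetD l ((l.length : Int) - b - 1) ' '))).map
      (fun b => b + 1)) ++ [0]
  (PySem.List.pySetD st.1 i (borders.headD 0), borders)

def suffix_border_array_alt (s : String) : List Int :=
  ((PySem.List.pyRange ((s.toList.length : Int) - 2) (-1) (-1)).foldl
    (sbaStepB s.toList) (List.replicate s.toList.length 0, [0])).1

-- ===== PRECONDITION & SPEC =====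
def Spec_suffix_border_array (s : String) (out : List Int) : Prop := out = suffix_border_array_alt s
instance (s : String) (out : List Int) : Decidable (Spec_suffix_border_array s out) := by unfold Spec_suffix_border_array; infer_instance

-- ===== CLAIM (what is proved, stated in full; the proofs are below) =====
def Claim_equal_suffix_border_array : Prop := ∀ (s : String), Dom_suffix_border_array s → Spec_suffix_border_array s (suffix_border_array s)

-- ===== LEMMAS AND PROOFS =====

-- the border list B maintains for suffix position j (proof-side model of B's state)
def Bl (l : List Char) (j : Nat) : List Int :=
  if _h : l.length ≤ j + 1 then [0]
  else
    ((Bl l (j + 1)).filter (fun b => decide (l.getD j ' ' = PySem.List.pyGetD l ((l.length : Int) - b - 1) ' '))).map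
      (fun b => b + 1) ++ [0]
termination_by l.length - j

-- the bs array after A (resp. B) has processed all indices ≥ i
def bsSpec (l : List Char) (i : Nat) : List Int :=
  (List.range l.length).map (fun j => if i ≤ j then (Bl l j).headD 0 else 0)


-- A border candidate predicate shared by the proofs (the char comparison both loops perform at text position i)
def predC (l : List Char) (i : Nat) (b : Int) : Bool :=
  decide (l.getD i ' ' = PySem.List.pyGetD l ((l.length : Int) - b - 1) ' ')

-- Bl unfolding equations
lemma Bl_base (l : List Char) (j : Nat) (h : l.length ≤ j + 1) : Bl l j = [0] := by
  rw [Bl, dif_pos h]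

lemma Bl_succ (l : List Char) (j : Nat) (h : ¬ l.length ≤ j + 1) :
    Bl l j = ((Bl l (j + 1)).filter (predC l j)).map (fun b => b + 1) ++ [0] := by
  rw [Bl, dif_neg h]; rfl

-- structure: every Bl is a list of borders ≥ 1 (bounded by the suffix length) followed by a final 0
lemma Bl_struct (l : List Char) (j : Nat) :
    ∃ P, Bl l j = P ++ [0] ∧ ∀ b ∈ P, 1 ≤ b ∧ b ≤ (l.length : Int) - 1 - j := by
  by_cases h : l.length ≤ j + 1
  · exact ⟨[], by rw [Bl_base l j h]; rfl, by simp⟩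
  · obtain ⟨P, hP, hPb⟩ := Bl_struct l (j + 1)
    refine ⟨((Bl l (j + 1)).filter (predC l j)).map (fun b => b + 1), Bl_succ l j h, ?_⟩
    intro b hb
    simp only [List.mem_map, List.mem_filter] at hb
    obtain ⟨b', ⟨hb'm, _⟩, rfl⟩ := hb
    rw [hP] at hb'm
    rcases List.mem_append.1 hb'm with h1 | h1
    · have := hPb b' h1
      constructor <;> omega
    · simp only [List.mem_singleton] at h1
      subst h1
      constructor <;> omega
termination_by l.length - j

lemma Bl_length (l : List Char) (j : Nat) (h : j < l.length) :
    (Bl l j).length ≤ l.length - j := by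
  by_cases hb : l.length ≤ j + 1
  · rw [Bl_base l j hb]; simp; omega
  · have ih := Bl_length l (j + 1) (by omega)
    rw [Bl_succ l j hb]
    have hf : ((Bl l (j + 1)).filter (predC l j)).length ≤ (Bl l (j + 1)).length :=
      List.length_filter_le _ _
    simp only [List.length_append, List.length_map, List.length_cons, List.length_nil]
    omega
termination_by l.length - j

lemma append_zero_eq (u v P : List Int) (hP : ∀ x ∈ P, x ≠ 0)
    (h : u ++ (0 : Int) :: v = P ++ [0]) : v = [] := by
  induction u generalizing P with
  | nil =>
    cases P with
    | nil => simpa using h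
    | cons p P' =>
      simp only [List.nil_append, List.cons_append, List.cons.injEq] at h
      exact absurd h.1.symm (hP p (by simp))
  | cons a u' ih =>
    cases P with
    | nil =>
      simp only [List.cons_append, List.nil_append, List.cons.injEq] at h
      exact absurd h.2 (by simp)
    | cons p P' =>
      simp only [List.cons_append, List.cons.injEq] at h
      exact ih P' (fun x hx => hP x (by simp [hx])) h.2

-- chain property: the entries after a nonzero entry b of Bl l j are exactly Bl l (n - b)
lemma Bl_chain (l : List Char) (j : Nat) (xs ys : List Int) (b : Int)
    (hd : Bl l j = xs ++ b :: ys) (hb : b ≠ 0) :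
    Bl l (l.length - b.toNat) = ys := by
  by_cases hbase : l.length ≤ j + 1
  · rw [Bl_base l j hbase] at hd
    cases xs with
    | nil =>
      simp only [List.nil_append, List.cons.injEq] at hd
      exact absurd hd.1.symm hb
    | cons x xs' =>
      simp only [List.cons_append, List.cons.injEq] at hd
      exact absurd hd.2 (by simp)
  · cases xs with
    | nil =>
      rw [Bl_succ l j hbase] at hd
      simp only [List.nil_append] at hd
      cases hF : (Bl l (j + 1)).filter (predC l j) with
      | nil =>
        rw [hF] at hd
        simp only [List.map_nil, List.nil_append, List.cons.injEq] at hd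
        exact absurd hd.1.symm hb
      | cons b0 zs =>
        rw [hF] at hd
        simp only [List.map_cons, List.cons_append, List.cons.injEq] at hd
        obtain ⟨hbeq, hys⟩ := hd
        obtain ⟨u, v, hM, _hu, hpb0, hfv⟩ := List.filter_eq_cons_iff.1 hF
        obtain ⟨P, hP, hPb⟩ := Bl_struct l (j + 1)
        have hchar : l.getD j ' ' = PySem.List.pyGetD l ((l.length : Int) - b0 - 1) ' ' := by
          simpa [predC] using hpb0
        by_cases hb0 : b0 = 0
        · subst hb0
          have hv : v = [] := append_zero_eq u v P
            (fun x hx => by have := hPb x hx; omega) (by rw [← hM, hP])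
          subst hv
          have hzs : zs = [] := by simpa using hfv.symm
          subst hzs
          have hbv : b = 1 := by omega
          subst hbv
          simp only [List.map_nil, List.nil_append] at hys
          rw [Bl_base l _ (by omega), hys]
        · have hb0P : b0 ∈ P := by
            have hmem : b0 ∈ Bl l (j + 1) := by rw [hM]; simp
            rw [hP] at hmem
            rcases List.mem_append.1 hmem with h | h
            · exact h
            · exact absurd (by simpa using h) hb0
          have hbd := hPb b0 hb0P
          have hrec := Bl_chain l (j + 1) u v b0 hM hb0
          have hm1 : l.length - b.toNat + 1 = l.length - b0.toNat := by omega
          have hnb : ¬ l.length ≤ (l.length - b.toNat) + 1 := by omega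
          rw [Bl_succ l _ hnb, hm1, hrec]
          have hchar2 : l.getD (l.length - b.toNat) ' ' = l.getD j ' ' := by
            have hcast : (l.length : Int) - b0 - 1 = ((l.length - b.toNat : Nat) : Int) := by omega
            rw [hchar, hcast, PySem.List.pyGetD_natCast]
          have hfe : v.filter (predC l (l.length - b.toNat)) = v.filter (predC l j) := by
            apply List.filter_congr
            intro x _
            simp only [predC, hchar2]
          rw [hfe, hfv]
          rw [← hys]
    | cons x xs' =>
      obtain ⟨P, hP, hPb⟩ := Bl_struct l j
      cases P with
      | nil =>
        rw [hP] at hd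
        simp only [List.nil_append, List.cons_append, List.cons.injEq] at hd
        exact absurd hd.2 (by simp)
      | cons q P' =>
        have hd0 := hd
        rw [hP] at hd
        simp only [List.cons_append, List.cons.injEq] at hd
        obtain ⟨hq, _⟩ := hd
        subst hq
        have hqb := hPb q (by simp)
        have hx0 : q ≠ 0 := by omega
        have h1 : Bl l (l.length - q.toNat) = xs' ++ b :: ys :=
          Bl_chain l j [] (xs' ++ b :: ys) q (by simpa using hd0) hx0
        exact Bl_chain l (l.length - q.toNat) xs' ys b h1 hb
termination_by (l.length - j, xs.length)
decreasing_by
  · exact Prod.Lex.left _ _ (by omega)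
  · exact Prod.Lex.right _ (by simp [*])
  · exact Prod.Lex.left _ _ (by omega)

-- the while loop walks Bl l j and stops at the first entry that is 0 or matches
lemma fall_spec (l : List Char) (i j : Nat) (bs : List Int) (fuel : Nat)
    (hij : i < j) (_hjn : j < l.length)
    (hbs : ∀ j', i < j' → j' < l.length → bs.getD j' 0 = (Bl l j').headD 0)
    (hfuel : (Bl l j).length ≤ fuel) :
    sbaFall l (i : Int) bs fuel ((Bl l j).headD 0)
      = ((Bl l j).find? (fun b => decide (b = 0) || predC l i b)).getD 0 := by
  obtain ⟨P, hP, hPb⟩ := Bl_struct l j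
  cases hL : Bl l j with
  | nil => rw [hL] at hP; cases P <;> simp at hP
  | cons c rest =>
    have hcP : c = 0 ∨ (1 ≤ c ∧ c ≤ (l.length : Int) - 1 - j) := by
      rw [hL] at hP
      cases P with
      | nil => exact Or.inl (by simpa using hP : c = 0 ∧ rest = []).1
      | cons q P' =>
        right
        simp only [List.cons_append, List.cons.injEq] at hP
        rw [hP.1]
        exact hPb q (by simp)
    have hlen : rest.length + 1 ≤ fuel := by
      rw [hL] at hfuel; simpa using hfuel
    obtain ⟨f, rfl⟩ : ∃ f, fuel = f + 1 := ⟨fuel - 1, by omega⟩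
    simp only [List.headD_cons]
    rw [sbaFall]
    have hgi : PySem.List.pyGetD l ((i : Nat) : Int) ' ' = l.getD i ' ' := by
      rw [PySem.List.pyGetD_natCast]
    by_cases hstop : c ≠ 0 ∧ PySem.List.pyGetD l ((i : Nat) : Int) ' ' ≠ PySem.List.pyGetD l ((l.length : Int) - c - 1) ' '
    · rw [if_pos hstop]
      have hc0 : c ≠ 0 := hstop.1
      have hne : ¬ l.getD i ' ' = PySem.List.pyGetD l ((l.length : Int) - c - 1) ' ' := by
        rw [← hgi]; exact hstop.2
      have hc : 1 ≤ c ∧ c ≤ (l.length : Int) - 1 - j := by tauto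
      have hj'1 : i < l.length - c.toNat := by omega
      have hj'2 : l.length - c.toNat < l.length := by omega
      have hcast : (l.length : Int) - c = ((l.length - c.toNat : Nat) : Int) := by omega
      rw [hcast, PySem.List.pyGetD_natCast]
      have hchain : Bl l (l.length - c.toNat) = rest :=
        Bl_chain l j [] rest c (by simpa using hL) hc0
      rw [hbs _ hj'1 hj'2]
      have ih := fall_spec l i (l.length - c.toNat) bs f hj'1 hj'2 hbs
        (by rw [hchain]; omega)
      rw [ih, hchain]
      have hpc : (decide (c = 0) || predC l i c) = false := by
        rw [Bool.or_eq_false_iff]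
        refine ⟨decide_eq_false hc0, ?_⟩
        rw [predC]
        exact decide_eq_false hne
      rw [List.find?_cons, hpc]
    · rw [if_neg hstop]
      have h' : c = 0 ∨ l.getD i ' ' = PySem.List.pyGetD l ((l.length : Int) - c - 1) ' ' := by
        rw [← hgi]; tauto
      have hpc : (decide (c = 0) || predC l i c) = true := by
        rcases h' with h | h
        · simp [h]
        · have h2 : predC l i c = true := by rw [predC]; exact decide_eq_true h
          simp [h2]
      rw [List.find?_cons, hpc]
      rfl
termination_by fuel

-- what A does with the loop result = the head B records
lemma sel_eq (p : Int → Bool) (P : List Int) (hP : ∀ x ∈ P, x ≠ 0) :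
    (if p (((P ++ [0]).find? (fun b => decide (b = 0) || p b)).getD 0) = true then
      ((((P ++ [0]).find? (fun b => decide (b = 0) || p b)).getD 0) + 1) else 0)
    = (((P ++ [0]).filter p).map (fun b => b + 1) ++ [0]).headD 0 := by
  induction P with
  | nil =>
    by_cases h0 : p 0 <;> simp [List.filter, h0]
  | cons a P' ih =>
    have ha : a ≠ 0 := hP a (by simp)
    by_cases hpa : p a
    · simp [List.filter_cons, hpa, ha]
    · have := ih (fun x hx => hP x (by simp [hx]))
      simpa [List.find?_cons, List.filter_cons, hpa, ha] using this

lemma bsSpec_getD (l : List Char) (i j : Nat) (hj : j < l.length) :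
    (bsSpec l i).getD j 0 = if i ≤ j then (Bl l j).headD 0 else 0 := by
  simp [bsSpec, List.getD_eq_getElem?_getD, hj]

lemma bsSpec_set (l : List Char) (k : Nat) (hk : k < l.length) :
    (bsSpec l (k + 1)).set k ((Bl l k).headD 0) = bsSpec l k := by
  apply List.ext_getElem?
  intro j
  simp only [List.getElem?_set, bsSpec, List.getElem?_map, List.length_map, List.length_range]
  by_cases hjk : k = j
  · subst hjk; simp [hk]
  · by_cases hjn : j < l.length
    · have hkj : (k < j) = (k ≤ j) := by
        apply propext; constructor <;> intro <;> omega
      simp [hjk, hjn, hkj]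
    · simp [hjk, hjn]

lemma bsSpec_init (l : List Char) :
    List.replicate l.length (0 : Int) = bsSpec l (l.length - 1) := by
  apply List.ext_getElem
  · simp [bsSpec]
  · intro j h1 h2
    simp only [List.getElem_replicate, bsSpec, List.getElem_map, List.getElem_range]
    simp only [bsSpec, List.length_map, List.length_range] at h2
    by_cases hj : l.length - 1 ≤ j
    · have : j = l.length - 1 := by omega
      subst this
      rw [Bl_base l _ (by omega)]
      simp
    · simp [hj]

lemma stepA (l : List Char) (k : Nat) (hk : k + 1 < l.length) :
    sbaStepA l (bsSpec l (k + 1)) (k : Int) = bsSpec l k := by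
  have hnot : ¬ l.length ≤ k + 1 := by omega
  have hbs : ∀ j', k < j' → j' < l.length →
      (bsSpec l (k + 1)).getD j' 0 = (Bl l j').headD 0 := by
    intro j' h1 h2
    rw [bsSpec_getD l (k + 1) j' h2, if_pos (by omega)]
  have hinit : PySem.List.pyGetD (bsSpec l (k + 1)) ((k : Int) + 1) 0 = (Bl l (k + 1)).headD 0 := by
    have hc : ((k : Int) + 1) = ((k + 1 : Nat) : Int) := by push_cast; ring
    rw [hc, PySem.List.pyGetD_natCast]
    exact hbs (k + 1) (by omega) hk
  have hfall := fall_spec l k (k + 1) (bsSpec l (k + 1)) (l.length + 1) (by omega) hk hbs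
    (le_trans (Bl_length l (k + 1) hk) (by omega))
  simp only [sbaStepA]
  rw [hinit, hfall]
  have hgk : PySem.List.pyGetD l ((k : Nat) : Int) ' ' = l.getD k ' ' := by
    rw [PySem.List.pyGetD_natCast]
  rw [hgk]
  obtain ⟨P, hP, hPb⟩ := Bl_struct l (k + 1)
  have hsel := sel_eq (predC l k) P (fun x hx => by have := hPb x hx; omega)
  rw [← hP] at hsel
  rw [← Bl_succ l k hnot] at hsel
  set F := ((Bl l (k + 1)).find? (fun b => decide (b = 0) || predC l k b)).getD 0 with hF
  split_ifs with h
  · have hpF : predC l k F = true := by rw [predC]; exact decide_eq_true h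
    rw [if_pos hpF] at hsel
    rw [PySem.List.pySetD_natCast, hsel, bsSpec_set l k (by omega)]
  · have hpF : predC l k F = false := by rw [predC]; exact decide_eq_false h
    rw [if_neg (by simp [hpF])] at hsel
    rw [PySem.List.pySetD_natCast, hsel, bsSpec_set l k (by omega)]

lemma stepB (l : List Char) (k : Nat) (hk : k + 1 < l.length) :
    sbaStepB l (bsSpec l (k + 1), Bl l (k + 1)) (k : Int) = (bsSpec l k, Bl l k) := by
  have hnot : ¬ l.length ≤ k + 1 := by omega
  simp only [sbaStepB]
  have hgk : PySem.List.pyGetD l ((k : Nat) : Int) ' ' = l.getD k ' ' := by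
    rw [PySem.List.pyGetD_natCast]
  simp only [hgk]
  have hb : ((Bl l (k + 1)).filter
      (fun b => decide (l.getD k ' ' = PySem.List.pyGetD l ((l.length : Int) - b - 1) ' '))).map
        (fun b => b + 1) ++ [0] = Bl l k := by
    rw [Bl_succ l k hnot]
    rfl
  rw [hb]
  rw [PySem.List.pySetD_natCast, bsSpec_set l k (by omega)]

lemma foldA (l : List Char) (m : Nat) (hm : m < l.length) :
    (PySem.List.pyRange ((m : Int) - 1) (-1) (-1)).foldl (sbaStepA l) (bsSpec l m) = bsSpec l 0 := by
  induction m with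
  | zero =>
    rw [PySem.List.pyRange_neg_one_eq_nil (by omega)]
    rfl
  | succ m ih =>
    have hc : ((m + 1 : Nat) : Int) - 1 = (m : Int) := by push_cast; ring
    rw [hc, PySem.List.pyRange_neg_one_cons (by omega), List.foldl_cons, stepA l m hm,
      ih (by omega)]

lemma foldB (l : List Char) (m : Nat) (hm : m < l.length) :
    (PySem.List.pyRange ((m : Int) - 1) (-1) (-1)).foldl (sbaStepB l) (bsSpec l m, Bl l m)
      = (bsSpec l 0, Bl l 0) := by
  induction m with
  | zero =>
    rw [PySem.List.pyRange_neg_one_eq_nil (by omega)]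
    rfl
  | succ m ih =>
    have hc : ((m + 1 : Nat) : Int) - 1 = (m : Int) := by push_cast; ring
    rw [hc, PySem.List.pyRange_neg_one_cons (by omega), List.foldl_cons, stepB l m hm,
      ih (by omega)]

-- ===== VERDICT (by name: the statement is the Claim_ definition above) =====
theorem suffix_border_array_spec : Claim_equal_suffix_border_array := by
  intro s _dom
  unfold Spec_suffix_border_array suffix_border_array suffix_border_array_alt
  by_cases h0 : s.toList.length = 0
  · rw [PySem.List.pyRange_neg_one_eq_nil (by omega)]
    simp [h0]
  · have h1 : ((s.toList.length : Int) - 2) = ((s.toList.length - 1 : Nat) : Int) - 1 := by omega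
    rw [h1, bsSpec_init]
    rw [show ([0] : List Int) = Bl s.toList (s.toList.length - 1) from
      (Bl_base _ _ (by omega)).symm]
    rw [foldA s.toList (s.toList.length - 1) (by omega),
      foldB s.toList (s.toList.length - 1) (by omega)]
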